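-- pv_equiv track=rewrite | github.com/OrelAshush123/Number-Base-Converter | Base.py | if_Friend
-- ===== SOURCE A (Python) =====
-- def if_Friend(Fb,Tb): # (from base)-"Fb" (to base)-"Tb"
--     """
--     This function checks if two bases, Fb and Tb, are "friends."
--     Two bases are considered friends if one can be
--     obtained by raising the other to a power between 1 and 8.
--     """
--     if Fb < Tb:
--         for i in range(1,9):
--             if Fb**i == Tb:
--                 return True
--     else:
--         for i in range(1,9):
--             if Tb**i == Fb:
--                 return True
--
--     return False
-- ===== SOURCE B (Python) =====
-- def if_Friend(Fb, Tb):
--     lo, hi = min(Fb, Tb), max(Fb, Tb)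
--     if lo == 0:
--         return hi == 0
--     n = hi
--     for _ in range(8):
--         if n == lo:
--             return True
--         if n % lo:
--             return False
--         n //= lo
--     return False
-- ===== Notes on version B (the rewrite author's own statement) =====
-- stated objective: alternative
-- what changed: B orders the pair as (min, max) once and tests whether max is a power of min by repeated exact division (n % lo / n //= lo) with early exit on non-divisibility, instead of A's two symmetric branches each enumerating base**i for i in 1..8.
import Mathlib
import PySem

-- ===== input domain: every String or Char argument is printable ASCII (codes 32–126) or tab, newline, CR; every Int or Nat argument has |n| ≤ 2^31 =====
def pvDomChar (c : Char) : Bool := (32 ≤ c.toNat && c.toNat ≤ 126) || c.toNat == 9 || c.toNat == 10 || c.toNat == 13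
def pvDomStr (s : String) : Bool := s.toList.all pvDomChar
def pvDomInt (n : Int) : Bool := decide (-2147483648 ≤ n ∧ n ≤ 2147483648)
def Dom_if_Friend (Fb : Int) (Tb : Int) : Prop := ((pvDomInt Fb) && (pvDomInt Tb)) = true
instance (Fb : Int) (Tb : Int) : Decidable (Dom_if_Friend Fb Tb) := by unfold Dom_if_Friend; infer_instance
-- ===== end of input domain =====

-- B: replaces A's power-enumeration with a repeated-exact-division power test on the ordered pair (min, max) (alternative algorithm, same cost).


-- ===== PORT A =====
def if_Friend (Fb : Int) (Tb : Int) : Bool :=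
  if Fb < Tb then
    (PySem.List.pyRange 1 9 1).any (fun i => Fb ^ i.toNat == Tb)
  else
    (PySem.List.pyRange 1 9 1).any (fun i => Tb ^ i.toNat == Fb)

-- ===== PORT B =====
-- the 'for _ in range(8)' division loop of Source B (n % lo / n //= lo are Python floor mod/div)
def divLoop (lo : Int) (n : Int) : Nat → Bool
  | 0 => false
  | k+1 =>
    if n == lo then true
    else if ¬ (PySem.Int.mod n lo = 0) then false
    else divLoop lo (PySem.Int.floordiv n lo) k

def if_Friend_alt (Fb : Int) (Tb : Int) : Bool :=
  let lo := min Fb Tb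
  let hi := max Fb Tb
  if lo == 0 then hi == 0
  else divLoop lo hi 8

-- ===== PRECONDITION & SPEC =====
def Spec_if_Friend (Fb : Int) (Tb : Int) (out : Bool) : Prop := out = if_Friend_alt Fb Tb
instance (Fb : Int) (Tb : Int) (out : Bool) : Decidable (Spec_if_Friend Fb Tb out) := by unfold Spec_if_Friend; infer_instance

-- ===== CLAIM (what is proved, stated in full; the proofs are below) =====
def Claim_equal_if_Friend : Prop := ∀ (Fb : Int) (Tb : Int), Dom_if_Friend Fb Tb → Spec_if_Friend Fb Tb (if_Friend Fb Tb)

-- ===== LEMMAS AND PROOFS =====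

-- "lo and hi are friends": hi is lo raised to some power between 1 and 8
def Friends (lo hi : Int) : Prop := ∃ j : Nat, 1 ≤ j ∧ j ≤ 8 ∧ lo ^ j = hi

theorem anyBranch_iff (b t : Int) :
    ((PySem.List.pyRange 1 9 1).any (fun i => b ^ i.toNat == t)) = true ↔ Friends b t := by
  have h : PySem.List.pyRange 1 9 1 = [1,2,3,4,5,6,7,8] := by decide
  rw [h]
  simp only [List.any_cons, List.any_nil, Bool.or_eq_true, beq_iff_eq, Bool.false_eq_true,
    or_false]
  constructor
  · rintro (h1|h1|h1|h1|h1|h1|h1|h1)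
    · exact ⟨1, by omega, by omega, h1⟩
    · exact ⟨2, by omega, by omega, h1⟩
    · exact ⟨3, by omega, by omega, h1⟩
    · exact ⟨4, by omega, by omega, h1⟩
    · exact ⟨5, by omega, by omega, h1⟩
    · exact ⟨6, by omega, by omega, h1⟩
    · exact ⟨7, by omega, by omega, h1⟩
    · exact ⟨8, by omega, by omega, h1⟩
  · rintro ⟨j, hj1, hj8, hpow⟩
    interval_cases j
    · exact Or.inl hpow
    · exact Or.inr (Or.inl hpow)
    · exact Or.inr (Or.inr (Or.inl hpow))
    · exact Or.inr (Or.inr (Or.inr (Or.inl hpow)))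
    · exact Or.inr (Or.inr (Or.inr (Or.inr (Or.inl hpow))))
    · exact Or.inr (Or.inr (Or.inr (Or.inr (Or.inr (Or.inl hpow)))))
    · exact Or.inr (Or.inr (Or.inr (Or.inr (Or.inr (Or.inr (Or.inl hpow))))))
    · exact Or.inr (Or.inr (Or.inr (Or.inr (Or.inr (Or.inr (Or.inr hpow))))))

theorem if_Friend_iff (Fb Tb : Int) :
    if_Friend Fb Tb = true ↔ Friends (min Fb Tb) (max Fb Tb) := by
  unfold if_Friend
  by_cases hlt : Fb < Tb
  · rw [if_pos hlt, anyBranch_iff, min_eq_left hlt.le, max_eq_right hlt.le]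
  · rw [if_neg hlt, anyBranch_iff, min_eq_right (not_lt.mp hlt), max_eq_left (not_lt.mp hlt)]

theorem divLoop_sound (lo : Int) :
    ∀ (f : Nat) (n : Int), divLoop lo n f = true → ∃ j : Nat, 1 ≤ j ∧ j ≤ f ∧ lo ^ j = n := by
  intro f
  induction f with
  | zero => intro n h; simp [divLoop] at h
  | succ k ih =>
    intro n h
    unfold divLoop at h
    by_cases he : n == lo
    · exact ⟨1, le_refl 1, by omega, by rw [pow_one]; exact (beq_iff_eq.mp he).symm⟩
    · rw [if_neg (by simpa using he)] at h
      by_cases hm : PySem.Int.mod n lo = 0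
      · rw [if_neg (by simpa using hm)] at h
        obtain ⟨j, hj1, hjk, hpow⟩ := ih _ h
        refine ⟨j + 1, by omega, by omega, ?_⟩
        have hdiv := PySem.Int.floordiv_mul_add_mod n lo
        rw [hm, add_zero] at hdiv
        rw [pow_succ, hpow]
        linarith [hdiv]
      · rw [if_pos (by simpa using hm)] at h
        exact absurd h (by simp)

theorem divLoop_complete (lo : Int) (hlo : lo ≠ 0) :
    ∀ (j f : Nat), 1 ≤ j → j ≤ f → divLoop lo (lo ^ j) f = true := by
  intro j
  induction j with
  | zero => intro f h; omega
  | succ m ih =>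
    intro f h1 hf
    obtain ⟨k, rfl⟩ : ∃ k, f = k + 1 := ⟨f - 1, by omega⟩
    unfold divLoop
    by_cases he : lo ^ (m + 1) == lo
    · rw [if_pos he]
    · rcases Nat.eq_zero_or_pos m with hm0 | hm1
      · subst hm0; simp at he
      · rw [if_neg he]
        have hdvd : lo ∣ lo ^ (m + 1) := dvd_pow_self lo (by omega)
        have hm : PySem.Int.mod (lo ^ (m + 1)) lo = 0 :=
          (PySem.Int.mod_eq_zero_iff_dvd _ _).mpr hdvd
        rw [if_neg (by simpa using hm)]
        have hq : PySem.Int.floordiv (lo ^ (m + 1)) lo = lo ^ m := by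
          have hdiv := PySem.Int.floordiv_mul_add_mod (lo ^ (m + 1)) lo
          rw [hm, add_zero] at hdiv
          have h2 : PySem.Int.floordiv (lo ^ (m + 1)) lo * lo = lo ^ m * lo := by
            rw [hdiv, pow_succ]
          exact mul_right_cancel₀ hlo h2
        rw [hq]
        exact ih _ hm1 (by omega)

theorem alt_iff (Fb Tb : Int) :
    if_Friend_alt Fb Tb = true ↔ Friends (min Fb Tb) (max Fb Tb) := by
  unfold if_Friend_alt
  set lo := min Fb Tb with hlo'
  set hi := max Fb Tb with hhi'
  by_cases h0 : lo = 0
  · rw [if_pos (by simpa using h0), h0]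
    simp only [beq_iff_eq]
    constructor
    · intro h; exact ⟨1, le_refl 1, by omega, by rw [pow_one, h]⟩
    · rintro ⟨j, hj1, _, hpow⟩
      rw [← hpow, zero_pow (by omega : j ≠ 0)]
  · rw [if_neg (by simpa using h0)]
    constructor
    · intro h
      obtain ⟨j, hj1, hj8, hpow⟩ := divLoop_sound lo 8 hi h
      exact ⟨j, hj1, hj8, hpow⟩
    · rintro ⟨j, hj1, hj8, hpow⟩
      rw [← hpow]
      exact divLoop_complete lo h0 j 8 hj1 hj8

-- ===== VERDICT (by name: the statement is the Claim_ definition above) =====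
theorem if_Friend_spec : Claim_equal_if_Friend := by
  intro Fb Tb _
  unfold Spec_if_Friend
  rw [Bool.eq_iff_iff, if_Friend_iff, alt_iff]
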